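-- pv_equiv track=rewrite | github.com/vintydong/AdventOfCode | 2024/day17.py | part2
-- ===== SOURCE A (Python) =====
-- def run_vm(A, B, C):
--     B = A & 7
--     B = B ^ 1
--     C = A >> B
--     B = B ^ 5
--     B = B ^ C
--     return (B & 7)
--
-- def part2(data):
--     """Solve part 2."""
--     # Backtrack from back of output since last number depends on final 3 bits of A
--     registers, program = data
--     stack = [(1, i) for i in range(7,-1,-1)]
--     while stack:
--         depth, val = stack.pop()
--         target = program[-depth]
--         vm_res = run_vm(val, 0, 0)
--         if vm_res == target:
--             if depth == len(program):
--                 return val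
--             stack.extend([(depth+1, (val << 3) + i) for i in range(7,-1,-1)])
-- ===== SOURCE B (Python) =====
-- def run_vm(A, B, C):
--     B = A & 7
--     B = B ^ 1
--     C = A >> B
--     B = B ^ 5
--     B = B ^ C
--     return (B & 7)
--
-- def part2(data):
--     """Solve part 2: recursive depth-first search over 3-bit extensions of A."""
--     registers, program = data
--
--     def solve(val, depth):
--         if run_vm(val, 0, 0) != program[-depth]:
--             return None
--         if depth == len(program):
--             return val
--         for i in range(8):
--             r = solve((val << 3) + i, depth + 1)
--             if r is not None:
--                 return r
--         return None
--
--     for i in range(8):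
--         r = solve(i, 1)
--         if r is not None:
--             return r
--     return None
-- ===== Notes on version B (the rewrite author's own statement) =====
-- stated objective: alternative
-- what changed: Replaces the explicit LIFO stack of (depth,val) pairs with a recursive solve(val,depth) helper that returns the first match of an ascending 0..7 scan, reproducing the same smallest-first DFS order.
import Mathlib
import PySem

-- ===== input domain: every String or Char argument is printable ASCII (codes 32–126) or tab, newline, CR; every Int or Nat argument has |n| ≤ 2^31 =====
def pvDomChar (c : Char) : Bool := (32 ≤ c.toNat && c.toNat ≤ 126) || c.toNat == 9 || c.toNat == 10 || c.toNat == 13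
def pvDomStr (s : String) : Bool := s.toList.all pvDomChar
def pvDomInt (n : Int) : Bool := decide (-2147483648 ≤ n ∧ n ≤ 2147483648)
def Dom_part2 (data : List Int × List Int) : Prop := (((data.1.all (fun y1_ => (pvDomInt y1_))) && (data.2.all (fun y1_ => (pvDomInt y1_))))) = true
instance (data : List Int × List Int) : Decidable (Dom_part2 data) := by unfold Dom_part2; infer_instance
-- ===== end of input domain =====

-- B rewrites the explicit-stack backtracking as a recursive DFS helper with the same
-- smallest-first search order; return values are identical wherever A returns.

-- ===== PORT A =====
-- run_vm: the shift amount (A & 7) ^ 1 is always in 0..7, so `.toNat` is exact here.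
def runVm (a b c : Int) : Int :=
  let b := PySem.Int.band a 7
  let b := PySem.Int.bxor b 1
  let c := a >>> b.toNat
  let b := PySem.Int.bxor b 5
  let b := PySem.Int.bxor b c
  PySem.Int.band b 7

-- the while-stack loop; the Lean list's HEAD is the TOP of the Python stack
-- (Python pops from the end, so Python's list is this list reversed).
-- pyGet? = none is where Python raises IndexError (excluded by Pre_).
def part2Loop (program : List Int) (stack : List (Nat × Int)) : Option Int :=
  match stack with
  | [] => none
  | (d, v) :: rest =>
    match h : PySem.List.pyGet? program (-(d : Int)) with
    | none => none
    | some target =>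
      if runVm v 0 0 = target then
        if d = program.length then some v
        else part2Loop program
          (((PySem.List.pyRange 7 (-1) (-1)).map (fun i => (d + 1, (v <<< 3) + i))).reverse ++ rest)
      else part2Loop program rest
termination_by (stack.map (fun p => 9 ^ (program.length + 1 - p.1))).sum
decreasing_by
  · have hd : d ≤ program.length := by
      have hin : PySem.Raise.InRange program.length (-(d : Int)) := by
        by_contra hc
        rw [← PySem.List.pyGet?_eq_none_iff] at hc
        simp [hc] at h
      unfold PySem.Raise.InRange at hin
      omega
    have hdl : d < program.length := by omega
    have h2 : program.length + 1 - (d + 1) = program.length - d := by omega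
    have h1 : program.length + 1 - d = (program.length - d) + 1 := by omega
    simp [PySem.List.pyRange, Function.comp_def, h1, h2, List.map_const']
    have hp : 0 < 9 ^ (program.length - d) := Nat.pow_pos (by norm_num)
    rw [pow_succ]
    omega
  · have hp : 0 < 9 ^ (program.length + 1 - d) := Nat.pow_pos (by norm_num)
    simp only [List.map_cons, List.sum_cons]
    omega

def part2 (data : List Int × List Int) : Option Int :=
  let program := data.2
  part2Loop program ((PySem.List.pyRange 7 (-1) (-1)).reverse.map (fun i => ((1 : Nat), i)))

-- ===== PORT B =====
-- recursive solve(val, depth); the for-i-in-range(8) loop with early return is childrenB.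
mutual
def solveB (program : List Int) (val : Int) (depth : Nat) : Option Int :=
  match h : PySem.List.pyGet? program (-(depth : Int)) with
  | none => none   -- Python raises IndexError here (excluded by Pre_)
  | some target =>
    if runVm val 0 0 ≠ target then none
    else if depth = program.length then some val
    else childrenB program val depth (List.range 8)
termination_by (program.length + 2 - depth, 0)
decreasing_by
  have hd : depth ≤ program.length := by
    have hin : PySem.Raise.InRange program.length (-(depth : Int)) := by
      by_contra hc
      rw [← PySem.List.pyGet?_eq_none_iff] at hc
      simp [hc] at h
    unfold PySem.Raise.InRange at hin
    omega
  apply Prod.Lex.left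
  omega

def childrenB (program : List Int) (val : Int) (depth : Nat) (is : List Nat) : Option Int :=
  match is with
  | [] => none
  | i :: rest =>
    match solveB program ((val <<< 3) + (i : Int)) (depth + 1) with
    | some r => some r
    | none => childrenB program val depth rest
termination_by (program.length + 1 - depth, is.length)
decreasing_by
  · have h1 : program.length + 2 - (depth + 1) = program.length + 1 - depth := by omega
    rw [h1]
    apply Prod.Lex.right
    simp
  · apply Prod.Lex.right
    simp
end

def part2_alt (data : List Int × List Int) : Option Int :=
  let program := data.2
  (List.range 8).findSome? (fun (i : Nat) => solveB program (i : Int) 1)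

-- ===== PRECONDITION & SPEC =====
-- Pre_ excludes the empty program, on which Python A raises IndexError (program[-1]).
def Pre_part2 (data : List Int × List Int) : Prop := data.2 ≠ []
instance (data : List Int × List Int) : Decidable (Pre_part2 data) := by unfold Pre_part2; infer_instance
def pvWitness_part2 : (List Int × List Int) := ([0], [4])
def Spec_part2 (data : List Int × List Int) (out : Option Int) : Prop := out = part2_alt data
instance (data : List Int × List Int) (out : Option Int) : Decidable (Spec_part2 data out) := by unfold Spec_part2; infer_instance

-- ===== CLAIM (what is proved, stated in full; the proofs are below) =====
def Claim_equal_part2 : Prop := ∀ (data : List Int × List Int), Dom_part2 data → Pre_part2 data → Spec_part2 data (part2 data)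

-- ===== LEMMAS AND PROOFS =====

theorem pyRange_lit : PySem.List.pyRange 7 (-1) (-1) = [7, 6, 5, 4, 3, 2, 1, 0] := by decide

theorem pyGet?_some_of_inv {program : List Int} {d : Nat}
    (h1 : 1 ≤ d) (h2 : d ≤ program.length) :
    ∃ t, PySem.List.pyGet? program (-(d : Int)) = some t := by
  cases hg : PySem.List.pyGet? program (-(d : Int)) with
  | some t => exact ⟨t, rfl⟩
  | none =>
    rw [PySem.List.pyGet?_eq_none_iff] at hg
    exact absurd (by unfold PySem.Raise.InRange; omega) hg

theorem children_eq (program : List Int) (v : Int) (d : Nat) :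
    List.findSome? (fun p => solveB program p.2 p.1)
      (((PySem.List.pyRange 7 (-1) (-1)).map (fun i => (d + 1, (v <<< 3) + i))).reverse)
    = childrenB program v d (List.range 8) := by
  rw [pyRange_lit]
  show List.findSome? _ [(d+1, v <<< 3 + 0), (d+1, v <<< 3 + 1), (d+1, v <<< 3 + 2),
        (d+1, v <<< 3 + 3), (d+1, v <<< 3 + 4), (d+1, v <<< 3 + 5), (d+1, v <<< 3 + 6),
        (d+1, v <<< 3 + 7)] = _
  have hr : List.range 8 = [0, 1, 2, 3, 4, 5, 6, 7] := by decide
  rw [hr]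
  simp only [List.findSome?, childrenB]
  norm_num
  cases solveB program (v <<< 3) (d + 1) <;>
    cases solveB program (v <<< 3 + 1) (d + 1) <;>
    cases solveB program (v <<< 3 + 2) (d + 1) <;>
    cases solveB program (v <<< 3 + 3) (d + 1) <;>
    cases solveB program (v <<< 3 + 4) (d + 1) <;>
    cases solveB program (v <<< 3 + 5) (d + 1) <;>
    cases solveB program (v <<< 3 + 6) (d + 1) <;>
    cases solveB program (v <<< 3 + 7) (d + 1) <;>
    rfl

theorem part2Loop_cons_eq (program : List Int) (d : Nat) (v : Int) (rest : List (Nat × Int))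
    (target : Int) (h : PySem.List.pyGet? program (-(d : Int)) = some target) :
    part2Loop program ((d, v) :: rest) =
      if runVm v 0 0 = target then
        if d = program.length then some v
        else part2Loop program
          (((PySem.List.pyRange 7 (-1) (-1)).map (fun i => (d + 1, (v <<< 3) + i))).reverse ++ rest)
      else part2Loop program rest := by
  rw [part2Loop]
  split
  · next heq => rw [heq] at h; cases h
  · next t heq => rw [heq] at h; injection h with h'; rw [h']

theorem solveB_eq_branch (program : List Int) (val : Int) (depth : Nat)
    (target : Int) (h : PySem.List.pyGet? program (-(depth : Int)) = some target) :
    solveB program val depth =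
      if runVm val 0 0 ≠ target then none
      else if depth = program.length then some val
      else childrenB program val depth (List.range 8) := by
  rw [solveB]
  split
  · next heq => rw [heq] at h; cases h
  · next t heq => rw [heq] at h; injection h with h'; rw [h']

theorem loop_eq (program : List Int) (stack : List (Nat × Int))
    (hinv : ∀ p ∈ stack, 1 ≤ p.1 ∧ p.1 ≤ program.length) :
    part2Loop program stack = stack.findSome? (fun p => solveB program p.2 p.1) := by
  induction stack using part2Loop.induct program with
  | case1 => simp [part2Loop]
  | case2 d v rest h =>
    have hd := hinv (d, v) (by simp)
    obtain ⟨t, ht⟩ := pyGet?_some_of_inv hd.1 hd.2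
    rw [ht] at h
    exact absurd h (by simp)
  | case3 v rest h =>
    rw [List.findSome?_cons, part2Loop_cons_eq program _ v rest _ h,
        solveB_eq_branch program v _ _ h]
    simp
  | case4 d v rest hlen h ih =>
    have hd := hinv (d, v) (by simp)
    have hdl : d < program.length := lt_of_le_of_ne hd.2 hlen
    have hinv' : ∀ p ∈ ((PySem.List.pyRange 7 (-1) (-1)).map
        (fun i => (d + 1, (v <<< 3) + i))).reverse ++ rest, 1 ≤ p.1 ∧ p.1 ≤ program.length := by
      intro p hp
      rcases List.mem_append.mp hp with hp | hp
      · rw [pyRange_lit] at hp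
        simp at hp
        rcases hp with hpe | hpe | hpe | hpe | hpe | hpe | hpe | hpe <;> simp [hpe] <;> omega
      · exact hinv p (List.mem_cons_of_mem _ hp)
    rw [List.findSome?_cons, part2Loop_cons_eq program d v rest _ h,
        solveB_eq_branch program v d _ h, if_pos rfl, if_neg hlen, ih hinv',
        List.findSome?_append, children_eq]
    simp only [ne_eq, not_true_eq_false, if_false, if_neg hlen]
    cases childrenB program v d (List.range 8) <;> simp
  | case5 d v rest target h hvm ih =>
    rw [List.findSome?_cons, part2Loop_cons_eq program d v rest _ h,
        solveB_eq_branch program v d _ h, if_neg hvm,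
        ih (fun p hp => hinv p (List.mem_cons_of_mem _ hp))]
    simp [hvm]

-- ===== VERDICT (by name: the statement is the Claim_ definition above) =====
theorem part2_spec : Claim_equal_part2 := by
  intro data hdom hpre
  unfold Spec_part2 part2 part2_alt
  have hL : 1 ≤ data.2.length := by
    cases h2 : data.2 with
    | nil => exact absurd h2 hpre
    | cons a l => simp
  rw [loop_eq]
  · rw [pyRange_lit]
    have hr : List.range 8 = [0, 1, 2, 3, 4, 5, 6, 7] := by decide
    rw [hr]
    simp only [List.reverse_cons, List.reverse_nil, List.nil_append, List.cons_append,
      List.map_cons, List.map_nil, List.findSome?_cons, List.findSome?_nil,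
      Nat.cast_ofNat, Nat.cast_zero, Nat.cast_one]
  · intro p hp
    rw [pyRange_lit] at hp
    simp at hp
    rcases hp with hpe | hpe | hpe | hpe | hpe | hpe | hpe | hpe <;> simp [hpe] <;> omega
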